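-- pv_equiv track=rewrite | github.com/guidocioni/no-more-wet-rides | radolan.py | get_radolan_header_token_pos
-- ===== SOURCE A (Python) =====
-- def get_radolan_header_token():
--     """Return array with known header token of radolan composites
--     Returns
--     -------
--     head : dict
--         with known header token, value set to None
--     """
--     head = {'BY': None, 'VS': None, 'SW': None, 'PR': None,
--             'INT': None, 'GP': None, 'MS': None, 'LV': None,
--             'CS': None, 'MX': None, 'BG': None, 'ST': None,
--             'VV': None, 'MF': None, 'QN': None, 'VR': None,
--             'U': None}
--     return head
--
-- def get_radolan_header_token_pos(header):
--     """Get Token and positions from DWD radolan header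
--     Parameters
--     ----------
--     header : string
--         (ASCII header)
--     Returns
--     -------
--     head : dictionary
--         with found header tokens and positions
--     """
--
--     head_dict = get_radolan_header_token()
--
--     for token in head_dict.keys():
--         d = header.rfind(token)
--         if d > -1:
--             head_dict[token] = d
--     head = {}
--
--     result_dict = {}
--     result_dict.update((k, v) for k, v in head_dict.items() if v is not None)
--     for k, v in head_dict.items():
--         if v is not None:
--             start = v + len(k)
--             filt = [x for x in result_dict.values() if x > v]
--             if filt:
--                 stop = min(filt)
--             else:
--                 stop = len(header)
--             head[k] = (start, stop)
--         else:
--             head[k] = v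
--
--     return head
-- ===== SOURCE B (Python) =====
-- def get_radolan_header_token_pos(header):
--     tokens = ['BY', 'VS', 'SW', 'PR', 'INT', 'GP', 'MS', 'LV', 'CS',
--               'MX', 'BG', 'ST', 'VV', 'MF', 'QN', 'VR', 'U']
--     found = [(t, header.rfind(t)) for t in tokens]
--     positions = sorted(p for _, p in found if p >= 0)
--     n = len(header)
--     out = {}
--     for t, p in found:
--         if p >= 0:
--             stop = next((x for x in positions if x > p), n)
--             out[t] = (p + len(t), stop)
--         else:
--             out[t] = None
--     return out
-- ===== Notes on version B (the rewrite author's own statement) =====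
-- stated objective: simpler
-- what changed: B computes all rfind positions in one pass, sorts the found positions once and takes each token's stop as the first strictly larger element of that sorted list, instead of A's per-token rescan taking min over a filtered copy of an intermediate dict's values.
import Mathlib
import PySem

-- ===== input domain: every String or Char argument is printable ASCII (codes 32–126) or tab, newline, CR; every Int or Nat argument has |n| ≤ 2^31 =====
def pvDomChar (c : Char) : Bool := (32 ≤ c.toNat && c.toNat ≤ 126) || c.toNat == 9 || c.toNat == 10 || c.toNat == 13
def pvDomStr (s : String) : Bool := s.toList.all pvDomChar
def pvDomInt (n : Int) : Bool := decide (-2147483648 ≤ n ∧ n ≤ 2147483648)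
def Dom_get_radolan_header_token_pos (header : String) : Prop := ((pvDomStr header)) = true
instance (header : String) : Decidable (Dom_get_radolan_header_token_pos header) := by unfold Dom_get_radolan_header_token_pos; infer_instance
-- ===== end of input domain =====

-- B computes each token's stop as the first strictly larger element of the once-sorted list of
-- found positions, instead of A's per-token min over a filtered rescan of an intermediate dict.

-- ===== PORT A =====
-- helper get_radolan_header_token: the literal dict of known tokens, all values None
def pv_get_radolan_header_token : PySem.Dict String (Option Int) :=
  PySem.Dict.ofList [("BY", none), ("VS", none), ("SW", none), ("PR", none),
    ("INT", none), ("GP", none), ("MS", none), ("LV", none),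
    ("CS", none), ("MX", none), ("BG", none), ("ST", none),
    ("VV", none), ("MF", none), ("QN", none), ("VR", none),
    ("U", none)]

def get_radolan_header_token_pos (header : String) : List (String × Option (Int × Int)) :=
  let head_dict0 := pv_get_radolan_header_token
  -- for token in head_dict.keys(): d = header.rfind(token); if d > -1: head_dict[token] = d
  let head_dict := (PySem.Dict.keys head_dict0).foldl (fun d token =>
      let dd := PySem.Str.rfind header token
      if dd > -1 then d.insert token (some dd) else d) head_dict0
  -- result_dict.update((k, v) for k, v in head_dict.items() if v is not None)
  let result_dict : PySem.Dict String Int := head_dict.items.foldl (fun r kv =>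
      match kv.2 with
      | some v => r.insert kv.1 v
      | none => r) PySem.Dict.empty
  let head : PySem.Dict String (Option (Int × Int)) := head_dict.items.foldl (fun h kv =>
      match kv.2 with
      | some v =>
        let start := v + PySem.Str.len kv.1
        let filt := (PySem.Dict.values result_dict).filter (fun x => decide (v < x))
        -- 'if filt: stop = min(filt) else: stop = len(header)'; min? is none exactly when filt = []
        let stop := match PySem.List.min? filt (fun x => x) with
          | some m => m
          | none => PySem.Str.len header
        h.insert kv.1 (some (start, stop))
      | none => h.insert kv.1 none) PySem.Dict.empty
  head.items

-- ===== PORT B =====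
def pvTokensB : List String :=
  ["BY", "VS", "SW", "PR", "INT", "GP", "MS", "LV", "CS",
   "MX", "BG", "ST", "VV", "MF", "QN", "VR", "U"]

def get_radolan_header_token_pos_alt (header : String) : List (String × Option (Int × Int)) :=
  let found := pvTokensB.map (fun t => (t, PySem.Str.rfind header t))
  let positions := PySem.List.sorted ((found.map Prod.snd).filter (fun p => decide (0 ≤ p))) (fun x => x) false
  let n := PySem.Str.len header
  let out : PySem.Dict String (Option (Int × Int)) := found.foldl (fun out tp =>
      if 0 ≤ tp.2 then
        -- stop = next((x for x in positions if x > p), n)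
        out.insert tp.1 (some (tp.2 + PySem.Str.len tp.1,
          ((positions.find? (fun x => decide (tp.2 < x))).getD n)))
      else out.insert tp.1 none) PySem.Dict.empty
  out.items

-- ===== PRECONDITION & SPEC =====
def Spec_get_radolan_header_token_pos (header : String) (out : List (String × Option (Int × Int))) : Prop := out = get_radolan_header_token_pos_alt header
instance (header : String) (out : List (String × Option (Int × Int))) : Decidable (Spec_get_radolan_header_token_pos header out) := by unfold Spec_get_radolan_header_token_pos; infer_instance

-- ===== CLAIM (what is proved, stated in full; the proofs are below) =====
def Claim_equal_get_radolan_header_token_pos : Prop := ∀ (header : String), Dom_get_radolan_header_token_pos header → Spec_get_radolan_header_token_pos header (get_radolan_header_token_pos header)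

-- ===== LEMMAS AND PROOFS =====

-- A's "stop" (min over a filtered list, len(header) when empty) equals B's
-- "first strictly larger element of the sorted list, default n".
lemma pvStop_eq (vs : List Int) (d n : Int) :
    (match PySem.List.min? (vs.filter (fun x => decide (d < x))) (fun x => x) with
      | some m => m
      | none => n)
    = ((PySem.List.sorted vs (fun x => x) false).find? (fun x => decide (d < x))).getD n := by
  have hperm : ((PySem.List.sorted vs (fun x => x) false).filter (fun x => decide (d < x))).Perm
      (vs.filter (fun x => decide (d < x))) :=
    (PySem.List.sorted_perm vs (fun x => x) false).filter _
  rw [← List.head?_filter]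
  cases hmin : PySem.List.min? (vs.filter (fun x => decide (d < x))) (fun x => x) with
  | none =>
    have h0 : vs.filter (fun x => decide (d < x)) = [] :=
      (PySem.List.min?_eq_none_iff _ _).mp hmin
    have hs : (PySem.List.sorted vs (fun x => x) false).filter (fun x => decide (d < x)) = [] := by
      rw [h0] at hperm; exact hperm.eq_nil
    simp [hs]
  | some m =>
    have hmem := PySem.List.min?_mem hmin
    have hisMin := PySem.List.min?_isMin hmin
    have hpw : ((PySem.List.sorted vs (fun x => x) false).filter (fun x => decide (d < x))).Pairwise
        (fun a b => a ≤ b) := (PySem.List.sorted_pairwise vs (fun x => x)).filter _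
    cases hsf : (PySem.List.sorted vs (fun x => x) false).filter (fun x => decide (d < x)) with
    | nil =>
      exfalso
      rw [hsf] at hperm
      rw [hperm.symm.eq_nil] at hmem
      simp at hmem
    | cons h t =>
      simp only [List.head?_cons, Option.getD_some]
      have hh : h ∈ vs.filter (fun x => decide (d < x)) := hperm.mem_iff.mp (by rw [hsf]; simp)
      have h1 : m ≤ h := hisMin h hh
      have h2 : h ≤ m := by
        have : m ∈ h :: t := by rw [← hsf]; exact hperm.mem_iff.mpr hmem
        rcases List.mem_cons.mp this with rfl | hmt
        · exact le_refl _
        · rw [hsf] at hpw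
          exact (List.pairwise_cons.mp hpw).1 m hmt
      omega

-- The first loop of A: updating the values of the pre-filled dict in place keeps
-- the key order and maps each key to its conditional rfind value.
lemma pvUpdLoop (f : String → Int) (ks : List String) :
    ∀ (pre : List (String × Option Int)) (d : PySem.Dict String (Option Int)),
    d.items = pre ++ ks.map (fun k => (k, (none : Option Int))) →
    ks.Nodup → (∀ k ∈ ks, ∀ q ∈ pre, q.1 ≠ k) →
    (ks.foldl (fun d token =>
        let dd := f token
        if dd > -1 then d.insert token (some dd) else d) d).items
      = pre ++ ks.map (fun k => (k, if f k > -1 then some (f k) else none)) := by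
  induction ks with
  | nil => intro pre d h _ _; simpa using h
  | cons k ks ih =>
    intro pre d hitems hnd hdis
    have hndk : ks.Nodup := (List.nodup_cons.mp hnd).2
    have hknot : k ∉ ks := (List.nodup_cons.mp hnd).1
    simp only [List.foldl_cons]
    by_cases hf : f k > -1
    · have hcont : d.contains k = true := by
        rw [PySem.Dict.contains_iff_mem_keys]
        simp only [PySem.Dict.keys, hitems]
        simp
      have hins : (d.insert k (some (f k))).items
          = (pre ++ [(k, some (f k))]) ++ ks.map (fun k => (k, (none : Option Int))) := by
        rw [PySem.Dict.items_insert_of_contains _ _ hcont, hitems]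
        simp only [List.map_append, List.map_cons, List.map_map]
        have hpre : pre.map (fun p => if (p.1 == k) = true then (k, some (f k)) else p) = pre := by
          have := List.map_congr_left (l := pre)
            (f := fun p => if (p.1 == k) = true then (k, some (f k)) else p) (g := id)
            (fun q hq => by simp [hdis k (by simp) q hq])
          simpa using this
        have hks : ks.map ((fun p => if (p.1 == k) = true then (k, some (f k)) else p) ∘
              (fun k => (k, (none : Option Int)))) = ks.map (fun k => (k, (none : Option Int))) := by
          apply List.map_congr_left
          intro a ha
          have : a ≠ k := fun h => hknot (h ▸ ha)
          simp [this]
        rw [hpre, hks]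
        simp
      simp only [hf, if_pos]
      rw [ih (pre ++ [(k, some (f k))]) _ hins hndk
        (by
          intro a ha q hq
          rcases List.mem_append.mp hq with hq | hq
          · exact hdis a (by simp [ha]) q hq
          · simp at hq
            subst hq
            exact fun h => hknot (by simp at h; rw [h]; exact ha))]
      simp [hf]
    · simp only [hf, if_false]
      rw [ih (pre ++ [(k, none)]) d
        (by rw [hitems]; simp)
        hndk
        (by
          intro a ha q hq
          rcases List.mem_append.mp hq with hq | hq
          · exact hdis a (by simp [ha]) q hq
          · simp at hq
            subst hq
            exact fun h => hknot (by simp at h; rw [h]; exact ha))]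
      simp [hf]

-- The result_dict loop: conditional inserts of fresh distinct keys append exactly
-- the (key, value) pairs whose value is not None.
lemma pvResLoop (l : List (String × Option Int)) :
    ∀ (r : PySem.Dict String Int),
    (∀ kv ∈ l, r.contains kv.1 = false) → (l.map Prod.fst).Nodup →
    (l.foldl (fun r kv =>
        match kv.2 with
        | some v => r.insert kv.1 v
        | none => r) r).items
      = r.items ++ l.filterMap (fun kv => kv.2.map (fun v => (kv.1, v))) := by
  induction l with
  | nil => intro r _ _; simp
  | cons kv l ih =>
    intro r hfresh hnd
    have hndl : (l.map Prod.fst).Nodup := (List.nodup_cons.mp hnd).2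
    have hknot : kv.1 ∉ l.map Prod.fst := (List.nodup_cons.mp hnd).1
    simp only [List.foldl_cons]
    cases hv : kv.2 with
    | none =>
      rw [ih r (fun q hq => hfresh q (by simp [hq])) hndl]
      simp [hv]
    | some v =>
      have hcont : r.contains kv.1 = false := hfresh kv (by simp)
      rw [ih (r.insert kv.1 v)
        (by
          intro q hq
          rw [PySem.Dict.contains_insert]
          have hne : q.1 ≠ kv.1 := by
            intro h
            exact hknot (h ▸ (List.mem_map.mpr ⟨q, hq, rfl⟩))
          simp [hne, hfresh q (by simp [hq])])
        hndl]
      rw [PySem.Dict.items_insert_of_not_contains _ _ hcont]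
      simp [hv]

-- values of the conditionally-collected pairs = the filtered list of found positions
lemma pvVals (f : String → Int) (ks : List String) :
    ((ks.map (fun k => (k, if f k > -1 then some (f k) else none))).filterMap
        (fun kv => kv.2.map (fun v => (kv.1, v)))).map Prod.snd
      = (ks.map f).filter (fun x => decide (0 ≤ x)) := by
  induction ks with
  | nil => simp
  | cons k ks ih =>
    simp only [List.map_cons, List.filterMap_cons]
    by_cases h : f k > -1
    · have h0 : decide ((0:Int) ≤ f k) = true := by simp; omega
      simp only [h, if_pos, Option.map_some, List.map_cons, List.filter_cons, h0]
      rw [ih]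
    · have h0 : decide ((0:Int) ≤ f k) = false := by simp; omega
      simp only [h, if_false, Option.map_none, List.filter_cons, h0]
      simpa using ih

lemma pvTokensB_nodup : pvTokensB.Nodup := by decide

lemma pv_keys_head0 : PySem.Dict.keys pv_get_radolan_header_token = pvTokensB := by decide

lemma pv_items_head0 :
    pv_get_radolan_header_token.items = pvTokensB.map (fun k => (k, (none : Option Int))) := by
  decide

-- the final loop of A / the loop of B: inserting fresh distinct keys appends, so the dict is a map
lemma pvInsertFoldMap {β ν : Type} (l : List (String × β)) (G : (String × β) → ν)
    (hnd : (l.map Prod.fst).Nodup) :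
    (l.foldl (fun h kv => h.insert kv.1 (G kv)) (PySem.Dict.empty : PySem.Dict String ν)).items
      = l.map (fun kv => (kv.1, G kv)) := by
  have := PySem.Dict.items_foldl_insert_fresh l Prod.fst G PySem.Dict.empty
    (by intro a _; simp [PySem.Dict.contains_empty]) hnd
  simpa using this

-- ===== VERDICT (by name: the statement is the Claim_ definition above) =====
theorem get_radolan_header_token_pos_spec : Claim_equal_get_radolan_header_token_pos := by
  intro header _
  unfold Spec_get_radolan_header_token_pos
  unfold get_radolan_header_token_pos get_radolan_header_token_pos_alt
  set f : String → Int := fun t => PySem.Str.rfind header t with hf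
  -- Step 1: A's head_dict in closed form
  have hstep1 :
      (pvTokensB.foldl (fun d token =>
          let dd := PySem.Str.rfind header token
          if dd > -1 then d.insert token (some dd) else d) pv_get_radolan_header_token).items
        = pvTokensB.map (fun k => (k, if f k > -1 then some (f k) else none)) := by
    have := pvUpdLoop f pvTokensB [] pv_get_radolan_header_token
      (by simpa using pv_items_head0) pvTokensB_nodup (by simp)
    simpa using this
  simp only [pv_keys_head0, hstep1]
  -- Step 2: result_dict's values = the filtered list of found positions
  have hndmap : ((pvTokensB.map (fun k => (k, if f k > -1 then some (f k) else none))).map Prod.fst).Nodup := by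
    simp only [List.map_map]
    simpa using pvTokensB_nodup
  have hres := pvResLoop (pvTokensB.map (fun k => (k, if f k > -1 then some (f k) else none)))
    PySem.Dict.empty (fun kv _ => by simp [PySem.Dict.contains_empty]) hndmap
  have hvals : (List.foldl
      (fun (r : PySem.Dict String Int) (kv : String × Option Int) =>
        match kv.2 with
        | some v => r.insert kv.1 v
        | none => r)
      PySem.Dict.empty
      (pvTokensB.map (fun k => (k, if f k > -1 then some (f k) else none)))).values
      = (pvTokensB.map f).filter (fun x => decide (0 ≤ x)) := by
    simp only [PySem.Dict.values, hres]
    rw [show (PySem.Dict.empty : PySem.Dict String Int).items = [] from rfl]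
    simpa using pvVals f pvTokensB
  rw [hvals]
  set pos := (pvTokensB.map f).filter (fun x => decide (0 ≤ x)) with hpos
  -- Step 3: both remaining loops insert fresh distinct keys, hence are maps
  have hbodyA : (fun (h : PySem.Dict String (Option (Int × Int))) (kv : String × Option Int) =>
      match kv.2 with
      | some v => h.insert kv.1 (some (v + PySem.Str.len kv.1,
          match PySem.List.min? (pos.filter (fun x => decide (v < x))) (fun x => x) with
          | some x => x
          | none => PySem.Str.len header))
      | none => h.insert kv.1 none)
    = fun h kv => h.insert kv.1 (match kv.2 with
      | some v => some (v + PySem.Str.len kv.1,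
          match PySem.List.min? (pos.filter (fun x => decide (v < x))) (fun x => x) with
          | some x => x
          | none => PySem.Str.len header)
      | none => none) := by
    funext h kv
    rcases kv with ⟨a, b⟩
    cases b <;> rfl
  rw [hbodyA, pvInsertFoldMap _ _ hndmap]
  have hsnd : List.map Prod.snd (List.map (fun t => (t, PySem.Str.rfind header t)) pvTokensB)
      = List.map f pvTokensB := by
    simp only [List.map_map]
    rfl
  rw [hsnd]
  have hndB : ((pvTokensB.map (fun t => (t, PySem.Str.rfind header t))).map Prod.fst).Nodup := by
    simp only [List.map_map]
    simpa using pvTokensB_nodup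
  have hbodyB : (fun (out : PySem.Dict String (Option (Int × Int))) (tp : String × Int) =>
      if 0 ≤ tp.2 then
        out.insert tp.1 (some (tp.2 + PySem.Str.len tp.1,
          ((PySem.List.sorted pos (fun x => x) false).find? (fun x => decide (tp.2 < x))).getD
            (PySem.Str.len header)))
      else out.insert tp.1 none)
    = fun out tp => out.insert tp.1 (if 0 ≤ tp.2 then
        some (tp.2 + PySem.Str.len tp.1,
          ((PySem.List.sorted pos (fun x => x) false).find? (fun x => decide (tp.2 < x))).getD
            (PySem.Str.len header))
      else none) := by
    funext out tp
    by_cases h : 0 ≤ tp.2 <;> simp [h]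
  rw [hbodyB, pvInsertFoldMap _ _ hndB]
  -- Step 4: pointwise comparison over the token list
  simp only [List.map_map]
  apply List.map_congr_left
  intro t ht
  simp only [Function.comp_apply]
  by_cases h : f t > -1
  · have h0 : (0:Int) ≤ f t := by omega
    have hft : PySem.Str.rfind header t = f t := rfl
    simp only [h, if_pos, hft, h0]
    rw [pvStop_eq pos (f t) (PySem.Str.len header)]
  · simp [h]
    show f t < 0
    omega
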